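-- pv_equiv track=rewrite | github.com/lucagutzeit/adventOfCode | 2025/day2/giftShop.py | complexInvalid
-- ===== SOURCE A (Python) =====
-- def complexInvalid(start, end):
--     sum = 0
--     for id in range(int(start), int(end)+1):
--         idStr = str(id)
--         for i in range(1, len(idStr)//2 + 1):
--             part = idStr[:i]
--             if len(idStr) % len(part) != 0:
--                 continue
--             div = len(idStr) // len(part)
--             if  part * div == idStr:
--                 sum += id
--                 break
--
--     return sum
-- ===== SOURCE B (Python) =====
-- def complexInvalid(start, end):
--     total = 0
--     for id in range(int(start), int(end) + 1):
--         s = str(id)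
--         if s in (s + s)[1:-1]:
--             total += id
--     return total
-- ===== Notes on version B (the rewrite author's own statement) =====
-- stated objective: faster
-- what changed: A tests each number for periodicity by trying every candidate block length and comparing a slice-repetition against the string; B uses the classic doubled-string trick, a single substring test s in (s+s)[1:-1] per number.
import Mathlib
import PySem

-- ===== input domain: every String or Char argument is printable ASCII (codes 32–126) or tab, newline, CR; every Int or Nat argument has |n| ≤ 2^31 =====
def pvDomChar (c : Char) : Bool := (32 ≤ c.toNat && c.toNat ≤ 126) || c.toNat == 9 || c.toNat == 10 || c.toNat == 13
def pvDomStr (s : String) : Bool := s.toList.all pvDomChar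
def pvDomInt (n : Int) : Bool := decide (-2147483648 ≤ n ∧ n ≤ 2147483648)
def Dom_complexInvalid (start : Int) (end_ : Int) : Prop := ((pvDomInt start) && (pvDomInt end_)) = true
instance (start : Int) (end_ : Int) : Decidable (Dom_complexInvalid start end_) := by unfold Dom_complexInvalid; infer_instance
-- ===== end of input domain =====

-- B replaces A's per-number scan over candidate block lengths (slice, multiply, compare) by the classic
-- doubled-string periodicity test  s in (s+s)[1:-1]  — a single substring search per number (objective: faster, constant factor).

-- ===== PORT A =====
-- inner loop of A over the candidate values of `i` (`break` = return true); `part`/`div` inlined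
def pvInnerA (cs : List Char) : List Int → Bool
  | [] => false
  | i :: rest =>
    if PySem.Int.mod (PySem.Chars.len cs) (PySem.Chars.len (PySem.Chars.slice cs none (some i))) ≠ 0 then
      pvInnerA cs rest
    else if PySem.List.pyRepeat (PySem.Chars.slice cs none (some i))
        (PySem.Int.floordiv (PySem.Chars.len cs) (PySem.Chars.len (PySem.Chars.slice cs none (some i)))) = cs then
      true
    else
      pvInnerA cs rest

def complexInvalid (start : Int) (end_ : Int) : Int :=
  (PySem.List.pyRange start (end_ + 1) 1).foldl
    (fun sum id =>
      if pvInnerA (PySem.Int.toChars id)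
          (PySem.List.pyRange 1 (PySem.Int.floordiv (PySem.Chars.len (PySem.Int.toChars id)) 2 + 1) 1) then
        sum + id
      else
        sum) 0

-- ===== PORT B =====
def complexInvalid_alt (start : Int) (end_ : Int) : Int :=
  (PySem.List.pyRange start (end_ + 1) 1).foldl
    (fun total id =>
      if PySem.Chars.isIn (PySem.Int.toChars id)
          (PySem.Chars.slice (PySem.Int.toChars id ++ PySem.Int.toChars id) (some 1) (some (-1))) then
        total + id
      else
        total) 0

-- ===== PRECONDITION & SPEC =====
def Spec_complexInvalid (start : Int) (end_ : Int) (out : Int) : Prop := out = complexInvalid_alt start end_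
instance (start : Int) (end_ : Int) (out : Int) : Decidable (Spec_complexInvalid start end_ out) := by unfold Spec_complexInvalid; infer_instance

-- ===== CLAIM (what is proved, stated in full; the proofs are below) =====
def Claim_equal_complexInvalid : Prop := ∀ (start : Int) (end_ : Int), Dom_complexInvalid start end_ → Spec_complexInvalid start end_ (complexInvalid start end_)

-- ===== LEMMAS AND PROOFS =====

-- `cs` is a nontrivial power of one of its prefixes: exactly what A's inner loop looks for
def pvIsPower (cs : List Char) : Prop :=
  ∃ d : ℕ, 0 < d ∧ 2 * d ≤ cs.length ∧ d ∣ cs.length ∧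
    (List.replicate (cs.length / d) (cs.take d)).flatten = cs

-- the per-`i` condition of A's inner loop, as a Bool
def pvCondA (cs : List Char) (i : Int) : Bool :=
  decide (PySem.Int.mod (PySem.Chars.len cs) (PySem.Chars.len (PySem.Chars.slice cs none (some i))) = 0) &&
  decide (PySem.List.pyRepeat (PySem.Chars.slice cs none (some i))
      (PySem.Int.floordiv (PySem.Chars.len cs) (PySem.Chars.len (PySem.Chars.slice cs none (some i)))) = cs)

theorem pvInnerA_eq_any (cs : List Char) (l : List Int) : pvInnerA cs l = l.any (pvCondA cs) := by
  induction l with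
  | nil => simp [pvInnerA]
  | cons i rest ih =>
    simp only [pvInnerA, List.any_cons, pvCondA, ih]
    by_cases h1 : PySem.Int.mod (PySem.Chars.len cs)
        (PySem.Chars.len (PySem.Chars.slice cs none (some i))) = 0
    · rw [if_neg (not_not_intro h1), decide_eq_true h1]
      by_cases h2 : PySem.List.pyRepeat (PySem.Chars.slice cs none (some i))
          (PySem.Int.floordiv (PySem.Chars.len cs)
            (PySem.Chars.len (PySem.Chars.slice cs none (some i)))) = cs
      · rw [if_pos h2, decide_eq_true h2]
        simp only [Bool.true_and, Bool.true_or]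
      · rw [if_neg h2, decide_eq_false h2]
        simp only [Bool.true_and, Bool.false_or]
    · rw [if_pos h1, decide_eq_false h1]
      simp only [Bool.false_and, Bool.false_or]

theorem pvCond_iff (cs : List Char) (d : ℕ) (_hd0 : 0 < d) (hdle : d ≤ cs.length) :
    (pvCondA cs (d : Int) = true) ↔
      (d ∣ cs.length ∧ (List.replicate (cs.length / d) (cs.take d)).flatten = cs) := by
  have hsl : PySem.Chars.slice cs none (some (d : Int)) = cs.take d := by
    simp [pysem]
  have hlen : PySem.Chars.len (cs.take d) = (d : Int) := by
    simp [PySem.Chars.len, List.length_take, Nat.min_eq_left hdle]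
  have hmod : PySem.Int.mod (PySem.Chars.len cs) (d : Int) = ((cs.length % d : ℕ) : Int) := by
    simpa [PySem.Chars.len] using PySem.Int.mod_natCast cs.length d
  have hfd : PySem.Int.floordiv (PySem.Chars.len cs) (d : Int) = ((cs.length / d : ℕ) : Int) := by
    simpa [PySem.Chars.len] using PySem.Int.floordiv_natCast cs.length d
  have hrep : PySem.List.pyRepeat (cs.take d) ((cs.length / d : ℕ) : Int) =
      (List.replicate (cs.length / d) (cs.take d)).flatten := by
    unfold PySem.List.pyRepeat
    rw [Int.toNat_natCast]
  unfold pvCondA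
  rw [hsl, hlen, hmod, hfd, hrep]
  constructor
  · intro hc
    simp only [Bool.and_eq_true, decide_eq_true_eq] at hc
    exact ⟨Nat.dvd_of_mod_eq_zero (by exact_mod_cast hc.1), hc.2⟩
  · rintro ⟨hdvd, hr⟩
    simp only [Bool.and_eq_true, decide_eq_true_eq]
    refine ⟨?_, hr⟩
    obtain ⟨m, hm⟩ := hdvd
    have : cs.length % d = 0 := by rw [hm]; exact Nat.mul_mod_right d m
    exact_mod_cast this

theorem pvA_iff (cs : List Char) :
    pvInnerA cs (PySem.List.pyRange 1 (PySem.Int.floordiv (PySem.Chars.len cs) 2 + 1) 1) = true ↔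
      pvIsPower cs := by
  have hfd : PySem.Int.floordiv (PySem.Chars.len cs) 2 = ((cs.length / 2 : ℕ) : Int) := by
    simpa [PySem.Chars.len] using PySem.Int.floordiv_natCast cs.length 2
  rw [pvInnerA_eq_any, List.any_eq_true]
  constructor
  · rintro ⟨i, hmem, hcond⟩
    rw [PySem.List.mem_pyRange_one] at hmem
    obtain ⟨hi1, hi2⟩ := hmem
    obtain ⟨d, rfl⟩ := Int.eq_ofNat_of_zero_le (by omega : (0:Int) ≤ i)
    rw [hfd] at hi2
    have hd1 : 1 ≤ d := by exact_mod_cast hi1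
    have hd2 : d ≤ cs.length / 2 := by
      have : (d : Int) ≤ ((cs.length / 2 : ℕ) : Int) := by omega
      exact_mod_cast this
    obtain ⟨hdvd, hrep⟩ := (pvCond_iff cs d (by omega) (by omega)).mp hcond
    exact ⟨d, by omega, by omega, hdvd, hrep⟩
  · rintro ⟨d, hd0, hd2, hdvd, hrep⟩
    refine ⟨(d : Int), ?_, (pvCond_iff cs d hd0 (by omega)).mpr ⟨hdvd, hrep⟩⟩
    rw [PySem.List.mem_pyRange_one, hfd]
    have hdh : d ≤ cs.length / 2 := by omega
    constructor
    · exact_mod_cast hd0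
    · have : (d : Int) ≤ ((cs.length / 2 : ℕ) : Int) := by exact_mod_cast hdh
      omega

-- Python's  s[1:-1]
theorem pvSlice_one_negone (xs : List Char) :
    PySem.Chars.slice xs (some 1) (some (-1)) = xs.tail.dropLast := by
  cases xs with
  | nil => rfl
  | cons x ys =>
    simp only [PySem.Chars.slice_eq_listSlice, PySem.List.slice, PySem.List.clampIdx]
    have h1 : ¬ ((1 : Int) < 0) := by decide
    have h2 : ((-1 : Int) < 0) := by decide
    simp only [h1, h2, if_true, if_false]
    have h3 : ¬ (((x :: ys).length : Int) + -1 < 0) := by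
      simp [List.length_cons]
    simp only [h3, if_false]
    have h4 : (((x :: ys).length : Int) + -1).toNat = ys.length := by
      simp [List.length_cons]
    have h5 : min (1 : Int).toNat (x :: ys).length = 1 := by
      simp [List.length_cons]
    rw [h4, h5]
    simp [List.dropLast_eq_take]

-- an occurrence of cs strictly inside cs++cs gives a nontrivial rotation fixing cs
theorem pvRotate_of_infix (cs : List Char) (h : cs ≠ [])
    (hinf : cs <:+: (cs ++ cs).tail.dropLast) :
    ∃ j : ℕ, 1 ≤ j ∧ j < cs.length ∧ cs.rotate j = cs := by
  obtain ⟨pre, post, heq⟩ := hinf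
  have hccne : cs ++ cs ≠ [] := by simp [h]
  obtain ⟨c0, rest, hcc⟩ := List.exists_cons_of_ne_nil hccne
  have htail : (cs ++ cs).tail = rest := by rw [hcc]; rfl
  have hrlen : rest.length + 1 = cs.length + cs.length := by
    have := congrArg List.length hcc
    simpa [List.length_append] using this.symm
  have hLpos : 0 < cs.length := List.length_pos_of_ne_nil h
  have hrest_ne : rest ≠ [] := by
    intro hr
    rw [hr] at hrlen
    simp at hrlen
    omega
  obtain ⟨c', hrest⟩ : ∃ c', rest.dropLast ++ [c'] = rest :=
    ⟨rest.getLast hrest_ne, List.dropLast_append_getLast hrest_ne⟩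
  rw [htail] at heq
  have hfull : cs ++ cs = c0 :: (pre ++ (cs ++ (post ++ [c']))) := by
    rw [hcc, ← hrest, ← heq]
    simp [List.append_assoc]
  have hlens := congrArg List.length hfull
  simp [List.length_append] at hlens
  have hjlt : pre.length + 1 < cs.length := by omega
  refine ⟨pre.length + 1, by omega, hjlt, ?_⟩
  have hdropj : (cs ++ cs).drop (pre.length + 1) = cs ++ (post ++ [c']) := by
    rw [hfull, List.drop_succ_cons, List.drop_left]
  have hdropj' : (cs ++ cs).drop (pre.length + 1) = cs.drop (pre.length + 1) ++ cs :=
    List.drop_append_of_le_length (by omega)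
  have he : cs ++ (post ++ [c']) = cs.drop (pre.length + 1) ++ cs := by
    rw [← hdropj, hdropj']
  have htk := congrArg (List.take cs.length) he
  rw [List.take_left] at htk
  have hsplit : cs.length = (cs.drop (pre.length + 1)).length + (pre.length + 1) := by
    simp [List.length_drop]
    omega
  rw [hsplit, List.take_append] at htk
  simp only [Nat.add_sub_cancel_left] at htk
  rw [List.take_of_length_le (by omega)] at htk
  rw [List.rotate_eq_drop_append_take (by omega : pre.length + 1 ≤ cs.length)]
  exact htk.symm

theorem pvRotate_add (cs : List Char) (b x : ℕ) (hb : cs.rotate b = cs) :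
    cs.rotate (b + x) = cs.rotate x := by
  rw [← List.rotate_rotate, hb]

theorem pvRotate_mul_add (cs : List Char) (b r : ℕ) (hb : cs.rotate b = cs) :
    ∀ k : ℕ, cs.rotate (k * b + r) = cs.rotate r := by
  intro k
  induction k with
  | zero => simp
  | succ k ih =>
    have : (k + 1) * b + r = b + (k * b + r) := by ring
    rw [this, pvRotate_add cs b _ hb, ih]

theorem pvRotate_mod (cs : List Char) (a b : ℕ) (ha : cs.rotate a = cs) (hb : cs.rotate b = cs) :
    cs.rotate (a % b) = cs := by
  have h := pvRotate_mul_add cs b (a % b) hb (a / b)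
  have hda : a / b * b + a % b = a := Nat.div_add_mod' a b
  rw [hda, ha] at h
  exact h.symm

theorem pvRotate_gcd (cs : List Char) :
    ∀ a b : ℕ, cs.rotate a = cs → cs.rotate b = cs → cs.rotate (Nat.gcd a b) = cs := by
  intro a b
  induction a, b using Nat.gcd.induction with
  | H0 n => intro _ hb; simpa using hb
  | H1 m n hm ih =>
    intro ha hb
    rw [Nat.gcd_rec]
    exact ih (pvRotate_mod cs n m hb ha) ha

-- p ++ q = q ++ p with |q| = |p|·m forces q to be the m-fold repetition of p
theorem pvCommPow (p : List Char) (hp : p ≠ []) :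
    ∀ (m : ℕ) (q : List Char), q.length = p.length * m → p ++ q = q ++ p →
      q = (List.replicate m p).flatten := by
  intro m
  induction m with
  | zero =>
    intro q hlen _
    simp at hlen ⊢
    exact hlen
  | succ m ih =>
    intro q hlen hcomm
    have hppos : 0 < p.length := List.length_pos_of_ne_nil hp
    have hple : p.length ≤ q.length := by
      rw [hlen, Nat.mul_succ]; omega
    have htake : q.take p.length = p := by
      have h1 : (p ++ q).take p.length = p := List.take_left
      rw [hcomm, List.take_append_of_le_length hple] at h1
      exact h1
    have hq : q = p ++ q.drop p.length := by
      conv_lhs => rw [← List.take_append_drop p.length q]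
      rw [htake]
    have hcomm' : p ++ q.drop p.length = q.drop p.length ++ p := by
      have h2 : p ++ (p ++ q.drop p.length) = p ++ (q.drop p.length ++ p) := by
        conv_lhs => rw [← hq]
        rw [hcomm, hq]
        simp [List.append_assoc]
      exact List.append_cancel_left h2
    have hlen' : (q.drop p.length).length = p.length * m := by
      simp [List.length_drop, hlen, Nat.mul_succ]
    rw [hq, ih _ hlen' hcomm']
    simp [List.replicate_succ]

theorem pvPow_of_rotate (cs : List Char) (g : ℕ) (hg0 : 0 < g) (hgL : g < cs.length)
    (hdvd : g ∣ cs.length) (hrot : cs.rotate g = cs) : pvIsPower cs := by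
  obtain ⟨m, hm⟩ := hdvd
  have hgle : g ≤ cs.length := le_of_lt hgL
  rcases m with _ | k
  · omega
  have hk1 : 1 ≤ k := by
    by_contra hk
    have : k = 0 := by omega
    rw [this] at hm
    simp at hm
    omega
  refine ⟨g, hg0, ?_, ⟨k + 1, hm⟩, ?_⟩
  · calc 2 * g = g * 2 := by ring
    _ ≤ g * (k + 1) := Nat.mul_le_mul_left g (by omega)
    _ = cs.length := hm.symm
  · have hsplitrot : cs.drop g ++ cs.take g = cs := by
      rw [← List.rotate_eq_drop_append_take hgle, hrot]
    have hptake : (cs.take g).length = g := by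
      simp [List.length_take, Nat.min_eq_left hgle]
    have hpne : cs.take g ≠ [] := by
      intro hc
      have := congrArg List.length hc
      rw [hptake] at this
      simp at this
      omega
    have hcomm : cs.take g ++ cs.drop g = cs.drop g ++ cs.take g := by
      rw [List.take_append_drop]
      exact hsplitrot.symm
    have hlenq : (cs.drop g).length = (cs.take g).length * k := by
      rw [hptake, List.length_drop, hm, Nat.mul_succ]
      omega
    have hqrep := pvCommPow (cs.take g) hpne k (cs.drop g) hlenq hcomm
    have hLg : cs.length / g = k + 1 := by
      rw [hm, Nat.mul_div_cancel_left _ hg0]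
    rw [hLg, List.replicate_succ, List.flatten_cons, ← hqrep, List.take_append_drop]

theorem pvInfix_of_pow (cs : List Char) (hpow : pvIsPower cs) :
    cs <:+: (cs ++ cs).tail.dropLast := by
  obtain ⟨d, hd0, hd2, hdvd, hrep⟩ := hpow
  obtain ⟨m, hm⟩ := hdvd
  have hdle : d ≤ cs.length := by omega
  have hplen : (cs.take d).length = d := by
    simp [List.length_take, Nat.min_eq_left hdle]
  have hpne : cs.take d ≠ [] := by
    intro hc
    have := congrArg List.length hc
    rw [hplen] at this
    simp at this
    omega
  have hm2 : 2 ≤ m := by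
    rcases m with _ | _ | k
    · omega
    · rw [hm] at hd2; omega
    · omega
  have hLd : cs.length / d = m := by
    rw [hm, Nat.mul_div_cancel_left _ hd0]
  rw [hLd] at hrep
  obtain ⟨c0, p1, hp0⟩ := List.exists_cons_of_ne_nil hpne
  -- cs ++ cs = p ++ (X ++ p)  with  X = flatten (replicate (2m-2) p)
  have hcc : cs ++ cs =
      cs.take d ++ ((List.replicate (2 * m - 2) (cs.take d)).flatten ++ cs.take d) := by
    have h1 : List.replicate (2 * m) (cs.take d) =
        List.replicate m (cs.take d) ++ List.replicate m (cs.take d) := by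
      rw [← List.replicate_add]; congr 1; omega
    have h2 : List.replicate (2 * m) (cs.take d) =
        List.replicate 1 (cs.take d) ++ List.replicate (2 * m - 2) (cs.take d) ++
          List.replicate 1 (cs.take d) := by
      rw [← List.replicate_add, ← List.replicate_add]; congr 1; omega
    have e1 := congrArg List.flatten h1
    have e2 := congrArg List.flatten h2
    rw [List.flatten_append, hrep] at e1
    rw [List.flatten_append, List.flatten_append] at e2
    rw [← e1, e2]
    simp [List.append_assoc]
  have hX : (List.replicate (2 * m - 2) (cs.take d)).flatten =
      cs ++ (List.replicate (m - 2) (cs.take d)).flatten := by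
    have h3 : List.replicate (2 * m - 2) (cs.take d) =
        List.replicate m (cs.take d) ++ List.replicate (m - 2) (cs.take d) := by
      rw [← List.replicate_add]; congr 1; omega
    rw [h3, List.flatten_append, hrep]
  refine ⟨p1, (List.replicate (m - 2) (cs.take d)).flatten ++ (cs.take d).dropLast, ?_⟩
  have htl : (cs ++ cs).tail =
      p1 ++ ((List.replicate (2 * m - 2) (cs.take d)).flatten ++ cs.take d) := by
    rw [hcc, hp0]
    simp
  have hdl : (p1 ++ ((List.replicate (2 * m - 2) (cs.take d)).flatten ++ cs.take d)).dropLast =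
      p1 ++ ((List.replicate (2 * m - 2) (cs.take d)).flatten ++ (cs.take d).dropLast) := by
    rw [← List.append_assoc, List.dropLast_append_of_ne_nil hpne, List.append_assoc]
  rw [htl, hdl, hX]
  simp [List.append_assoc]

theorem pvB_iff (cs : List Char) (h : cs ≠ []) :
    PySem.Chars.isIn cs (PySem.Chars.slice (cs ++ cs) (some 1) (some (-1))) = true ↔
      pvIsPower cs := by
  rw [pvSlice_one_negone, PySem.Chars.isIn_iff_infix]
  constructor
  · intro hinf
    obtain ⟨j, hj1, hjL, hrot⟩ := pvRotate_of_infix cs h hinf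
    have hrotL : cs.rotate cs.length = cs := List.rotate_length cs
    have hg := pvRotate_gcd cs j cs.length hrot hrotL
    have hgpos : 0 < Nat.gcd j cs.length := Nat.gcd_pos_of_pos_left _ (by omega)
    have hgle : Nat.gcd j cs.length ≤ j := Nat.gcd_le_left _ (by omega)
    exact pvPow_of_rotate cs (Nat.gcd j cs.length) hgpos (by omega)
      (Nat.gcd_dvd_right j cs.length) hg
  · exact pvInfix_of_pow cs

-- str(n) is never the empty string
theorem pvToDigitsCore_ne_nil (b : ℕ) :
    ∀ (f n : ℕ) (l : List Char), l ≠ [] → Nat.toDigitsCore b f n l ≠ [] := by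
  intro f
  induction f with
  | zero => intro n l hl; simpa [Nat.toDigitsCore] using hl
  | succ f ih =>
    intro n l hl
    simp only [Nat.toDigitsCore]
    by_cases h : n / b = 0
    · simp [h]
    · simp only [h, if_false]
      exact ih (n / b) _ (by simp)

theorem pvToChars_ne_nil (n : Int) : PySem.Int.toChars n ≠ [] := by
  unfold PySem.Int.toChars
  split_ifs
  · simp
  · unfold Nat.toDigits
    simp only [Nat.toDigitsCore]
    by_cases h : n.toNat / 10 = 0
    · simp [h]
    · simp only [h, if_false]
      exact pvToDigitsCore_ne_nil 10 n.toNat _ _ (by simp)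

theorem pvKey (cs : List Char) (h : cs ≠ []) :
    pvInnerA cs (PySem.List.pyRange 1 (PySem.Int.floordiv (PySem.Chars.len cs) 2 + 1) 1) =
      PySem.Chars.isIn cs (PySem.Chars.slice (cs ++ cs) (some 1) (some (-1))) := by
  rw [Bool.eq_iff_iff, pvA_iff, pvB_iff cs h]

-- ===== VERDICT (by name: the statement is the Claim_ definition above) =====
theorem complexInvalid_spec : Claim_equal_complexInvalid := by
  intro start end_ _hdom
  unfold Spec_complexInvalid complexInvalid complexInvalid_alt
  have hfun : (fun (sum : Int) (id : Int) =>
      if pvInnerA (PySem.Int.toChars id)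
          (PySem.List.pyRange 1 (PySem.Int.floordiv (PySem.Chars.len (PySem.Int.toChars id)) 2 + 1) 1) then
        sum + id
      else sum) =
      (fun (total : Int) (id : Int) =>
        if PySem.Chars.isIn (PySem.Int.toChars id)
            (PySem.Chars.slice (PySem.Int.toChars id ++ PySem.Int.toChars id) (some 1) (some (-1))) then
          total + id
        else total) := by
    funext total id
    rw [pvKey (PySem.Int.toChars id) (pvToChars_ne_nil id)]
  rw [hfun]
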